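-- pv_equiv track=rewrite | github.com/Ryu-jae-kwong/steganography-cli-toolkit | core/advanced_image/iwt.py | _get_high_frequency_positions
-- ===== SOURCE A (Python) =====
-- from typing import Optional, Tuple, List
--
-- def _get_high_frequency_positions(height: int, width: int) -> List[Tuple[int, int]]:
--     """고주파 영역의 좌표 반환 (HH, HL, LH 대역)"""
--     positions = []
--     half_h, half_w = height // 2, width // 2
--
--     # HH (대각선 고주파)
--     for i in range(half_h, height):
--         for j in range(half_w, width):
--             positions.append((i, j))
--
--     # HL (수평 고주파)
--     for i in range(half_h):
--         for j in range(half_w, width):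
--             positions.append((i, j))
--
--     # LH (수직 고주파)
--     for i in range(half_h, height):
--         for j in range(half_w):
--             positions.append((i, j))
--
--     return positions
-- ===== SOURCE B (Python) =====
-- from typing import Optional, Tuple, List
--
-- def _get_high_frequency_positions(height: int, width: int) -> List[Tuple[int, int]]:
--     """Single row-major scan of the grid, bucketing into HH / HL / LH."""
--     half_h, half_w = height // 2, width // 2
--     hh: List[Tuple[int, int]] = []
--     hl: List[Tuple[int, int]] = []
--     lh: List[Tuple[int, int]] = []
--     for i in range(height):
--         for j in range(width):
--             if i >= half_h and j >= half_w:
--                 hh.append((i, j))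
--             elif i < half_h and j >= half_w:
--                 hl.append((i, j))
--             elif i >= half_h and j < half_w:
--                 lh.append((i, j))
--     return hh + hl + lh
-- ===== Notes on version B (the rewrite author's own statement) =====
-- stated objective: alternative
-- what changed: Replaces A's three separate nested subband loops with one row-major scan of the whole grid that classifies each cell into one of three bucket lists (HH/HL/LH) and concatenates them at the end.
import Mathlib
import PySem

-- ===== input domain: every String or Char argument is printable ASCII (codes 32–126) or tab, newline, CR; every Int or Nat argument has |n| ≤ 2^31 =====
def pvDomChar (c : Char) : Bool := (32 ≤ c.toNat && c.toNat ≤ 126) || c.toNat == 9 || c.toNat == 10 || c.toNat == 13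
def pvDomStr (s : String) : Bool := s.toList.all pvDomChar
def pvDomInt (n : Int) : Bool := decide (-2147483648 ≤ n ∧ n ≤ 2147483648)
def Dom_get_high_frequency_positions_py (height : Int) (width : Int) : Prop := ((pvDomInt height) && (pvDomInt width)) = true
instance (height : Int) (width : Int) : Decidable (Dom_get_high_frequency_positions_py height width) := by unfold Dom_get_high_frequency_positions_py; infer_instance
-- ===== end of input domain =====

-- B replaces A's three separate subband loops by one row-major scan bucketing cells into three lists (objective: alternative decomposition, same cost).

-- ===== PORT A =====
def get_high_frequency_positions_py (height : Int) (width : Int) : List (Int × Int) :=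
  let half_h := PySem.Int.floordiv height 2
  let half_w := PySem.Int.floordiv width 2
  let positions : List (Int × Int) := []
  -- HH
  let positions := (PySem.List.pyRange half_h height 1).foldl
    (fun acc i => (PySem.List.pyRange half_w width 1).foldl (fun a j => a ++ [(i, j)]) acc) positions
  -- HL
  let positions := (PySem.List.pyRange 0 half_h 1).foldl
    (fun acc i => (PySem.List.pyRange half_w width 1).foldl (fun a j => a ++ [(i, j)]) acc) positions
  -- LH
  let positions := (PySem.List.pyRange half_h height 1).foldl
    (fun acc i => (PySem.List.pyRange 0 half_w 1).foldl (fun a j => a ++ [(i, j)]) acc) positions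
  positions

-- ===== PORT B =====
-- state: the three bucket lists (hh, hl, lh)
def pvStepInner (half_h half_w i : Int)
    (s : List (Int × Int) × List (Int × Int) × List (Int × Int)) (j : Int) :
    List (Int × Int) × List (Int × Int) × List (Int × Int) :=
  if half_h ≤ i ∧ half_w ≤ j then (s.1 ++ [(i, j)], s.2.1, s.2.2)
  else if i < half_h ∧ half_w ≤ j then (s.1, s.2.1 ++ [(i, j)], s.2.2)
  else if half_h ≤ i ∧ j < half_w then (s.1, s.2.1, s.2.2 ++ [(i, j)])
  else s

def pvStepOuter (half_h half_w width : Int)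
    (s : List (Int × Int) × List (Int × Int) × List (Int × Int)) (i : Int) :
    List (Int × Int) × List (Int × Int) × List (Int × Int) :=
  (PySem.List.pyRange 0 width 1).foldl (pvStepInner half_h half_w i) s

def get_high_frequency_positions_py_alt (height : Int) (width : Int) : List (Int × Int) :=
  let half_h := PySem.Int.floordiv height 2
  let half_w := PySem.Int.floordiv width 2
  let s := (PySem.List.pyRange 0 height 1).foldl (pvStepOuter half_h half_w width) ([], [], [])
  s.1 ++ s.2.1 ++ s.2.2

-- ===== PRECONDITION & SPEC =====
def Spec_get_high_frequency_positions_py (height : Int) (width : Int) (out : List (Int × Int)) : Prop := out = get_high_frequency_positions_py_alt height width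
instance (height : Int) (width : Int) (out : List (Int × Int)) : Decidable (Spec_get_high_frequency_positions_py height width out) := by unfold Spec_get_high_frequency_positions_py; infer_instance

-- ===== CLAIM (what is proved, stated in full; the proofs are below) =====
def Claim_equal_get_high_frequency_positions_py : Prop := ∀ (height : Int) (width : Int), Dom_get_high_frequency_positions_py height width → Spec_get_high_frequency_positions_py height width (get_high_frequency_positions_py height width)

-- ===== LEMMAS AND PROOFS =====

-- inner scan of one row from an arbitrary state: each bucket grows by its filtered row
lemma pv_innerB (half_h half_w i : Int) (cols : List Int)
    (s : List (Int × Int) × List (Int × Int) × List (Int × Int)) :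
    cols.foldl (pvStepInner half_h half_w i) s =
      (s.1 ++ (cols.filter (fun j => decide (half_h ≤ i ∧ half_w ≤ j))).map (fun j => (i, j)),
       s.2.1 ++ (cols.filter (fun j => decide (i < half_h ∧ half_w ≤ j))).map (fun j => (i, j)),
       s.2.2 ++ (cols.filter (fun j => decide (half_h ≤ i ∧ j < half_w))).map (fun j => (i, j))) := by
  induction cols generalizing s with
  | nil => simp
  | cons c cs ih =>
    rw [List.foldl_cons, ih]
    unfold pvStepInner
    split_ifs with h1 h2 h3 <;> simp_all

-- outer scan from an arbitrary state
lemma pv_outerB (half_h half_w width : Int) (rows : List Int)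
    (s : List (Int × Int) × List (Int × Int) × List (Int × Int)) :
    rows.foldl (pvStepOuter half_h half_w width) s =
      (s.1 ++ (rows.filter (fun i => decide (half_h ≤ i))).flatMap
          (fun i => ((PySem.List.pyRange 0 width 1).filter (fun j => decide (half_w ≤ j))).map (fun j => (i, j))),
       s.2.1 ++ (rows.filter (fun i => decide (i < half_h))).flatMap
          (fun i => ((PySem.List.pyRange 0 width 1).filter (fun j => decide (half_w ≤ j))).map (fun j => (i, j))),
       s.2.2 ++ (rows.filter (fun i => decide (half_h ≤ i))).flatMap
          (fun i => ((PySem.List.pyRange 0 width 1).filter (fun j => decide (j < half_w))).map (fun j => (i, j)))) := by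
  induction rows generalizing s with
  | nil => simp
  | cons r rs ih =>
    rw [List.foldl_cons, pvStepOuter, pv_innerB, ih]
    by_cases hr : half_h ≤ r
    · have hr' : ¬ r < half_h := by omega
      simp [hr, hr', List.flatMap_cons, List.append_assoc]
    · have hr' : r < half_h := by omega
      simp [hr, hr', List.flatMap_cons, List.append_assoc]

-- filtering the full 0..b range by a threshold 0 ≤ m ≤ b recovers the sub-ranges
lemma pv_filter_ge (m b : Int) (h0 : 0 ≤ m) (hb : m ≤ b) :
    (PySem.List.pyRange 0 b 1).filter (fun x => decide (m ≤ x)) = PySem.List.pyRange m b 1 := by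
  rw [PySem.List.pyRange_one_append 0 m b h0 hb, List.filter_append]
  have e1 : (PySem.List.pyRange 0 m 1).filter (fun x => decide (m ≤ x)) = [] :=
    List.filter_eq_nil_iff.mpr (fun x hx => by
      rw [PySem.List.mem_pyRange_one] at hx; simp; omega)
  have e2 : (PySem.List.pyRange m b 1).filter (fun x => decide (m ≤ x)) = PySem.List.pyRange m b 1 :=
    List.filter_eq_self.mpr (fun x hx => by
      rw [PySem.List.mem_pyRange_one] at hx; simp; omega)
  rw [e1, e2, List.nil_append]

lemma pv_filter_lt (m b : Int) (h0 : 0 ≤ m) (hb : m ≤ b) :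
    (PySem.List.pyRange 0 b 1).filter (fun x => decide (x < m)) = PySem.List.pyRange 0 m 1 := by
  rw [PySem.List.pyRange_one_append 0 m b h0 hb, List.filter_append]
  have e1 : (PySem.List.pyRange 0 m 1).filter (fun x => decide (x < m)) = PySem.List.pyRange 0 m 1 :=
    List.filter_eq_self.mpr (fun x hx => by
      rw [PySem.List.mem_pyRange_one] at hx; simp; omega)
  have e2 : (PySem.List.pyRange m b 1).filter (fun x => decide (x < m)) = [] :=
    List.filter_eq_nil_iff.mpr (fun x hx => by
      rw [PySem.List.mem_pyRange_one] at hx; simp; omega)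
  rw [e1, e2, List.append_nil]

-- B unfolded to its fold (definitional)
lemma pv_B_eq (height width : Int) :
    get_high_frequency_positions_py_alt height width =
      ((PySem.List.pyRange 0 height 1).foldl
          (pvStepOuter (PySem.Int.floordiv height 2) (PySem.Int.floordiv width 2) width) ([], [], [])).1
      ++ ((PySem.List.pyRange 0 height 1).foldl
          (pvStepOuter (PySem.Int.floordiv height 2) (PySem.Int.floordiv width 2) width) ([], [], [])).2.1
      ++ ((PySem.List.pyRange 0 height 1).foldl
          (pvStepOuter (PySem.Int.floordiv height 2) (PySem.Int.floordiv width 2) width) ([], [], [])).2.2 := rfl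

-- A in flatMap form
lemma pv_A_flat (height width : Int) :
    get_high_frequency_positions_py height width =
      (PySem.List.pyRange (PySem.Int.floordiv height 2) height 1).flatMap
        (fun i => (PySem.List.pyRange (PySem.Int.floordiv width 2) width 1).map (fun j => (i, j)))
      ++ (PySem.List.pyRange 0 (PySem.Int.floordiv height 2) 1).flatMap
        (fun i => (PySem.List.pyRange (PySem.Int.floordiv width 2) width 1).map (fun j => (i, j)))
      ++ (PySem.List.pyRange (PySem.Int.floordiv height 2) height 1).flatMap
        (fun i => (PySem.List.pyRange 0 (PySem.Int.floordiv width 2) 1).map (fun j => (i, j))) := by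
  unfold get_high_frequency_positions_py
  simp only [PySem.List.foldl_append_singleton_eq_map, PySem.List.foldl_append_eq_flatMap,
    List.nil_append, List.append_assoc]

-- ===== VERDICT (by name: the statement is the Claim_ definition above) =====
theorem get_high_frequency_positions_py_spec : Claim_equal_get_high_frequency_positions_py := by
  intro height width _
  unfold Spec_get_high_frequency_positions_py
  rw [pv_A_flat]
  rw [pv_B_eq, pv_outerB]
  simp only [List.nil_append]
  set hh := PySem.Int.floordiv height 2 with hhh
  set hw := PySem.Int.floordiv width 2 with hhw
  have hrows : ((PySem.List.pyRange 0 height 1).filter (fun i => decide (hh ≤ i)) = PySem.List.pyRange hh height 1)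
      ∧ ((PySem.List.pyRange 0 height 1).filter (fun i => decide (i < hh)) = PySem.List.pyRange 0 hh 1) := by
    by_cases hp : 0 < height
    · have h1 : 0 ≤ hh := by rw [hhh, PySem.Int.floordiv_eq_ediv_of_pos (by omega)]; omega
      have h2 : hh ≤ height := by rw [hhh, PySem.Int.floordiv_eq_ediv_of_pos (by omega)]; omega
      exact ⟨pv_filter_ge hh height h1 h2, pv_filter_lt hh height h1 h2⟩
    · have hhle : height ≤ hh ∧ hh ≤ 0 := by
        rw [hhh, PySem.Int.floordiv_eq_ediv_of_pos (show (0:Int) < 2 by omega)] at *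
        constructor <;> omega
      rw [PySem.List.pyRange_one_eq_nil (show height ≤ (0:Int) by omega),
          PySem.List.pyRange_one_eq_nil hhle.1, PySem.List.pyRange_one_eq_nil hhle.2]
      simp
  by_cases wp : 0 < width
  · have w1 : 0 ≤ hw := by rw [hhw, PySem.Int.floordiv_eq_ediv_of_pos (by omega)]; omega
    have w2 : hw ≤ width := by rw [hhw, PySem.Int.floordiv_eq_ediv_of_pos (by omega)]; omega
    rw [hrows.1, hrows.2, pv_filter_ge hw width w1 w2, pv_filter_lt hw width w1 w2,
        List.append_assoc]
  · have hwle : width ≤ hw ∧ hw ≤ 0 := by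
      rw [hhw, PySem.Int.floordiv_eq_ediv_of_pos (show (0:Int) < 2 by omega)] at *
      constructor <;> omega
    rw [PySem.List.pyRange_one_eq_nil (show width ≤ (0:Int) by omega),
        PySem.List.pyRange_one_eq_nil hwle.1, PySem.List.pyRange_one_eq_nil hwle.2]
    have z : ∀ (l : List Int), l.flatMap (fun _ => ([] : List (Int × Int))) = [] :=
      fun l => List.flatMap_eq_nil_iff.mpr (fun _ _ => rfl)
    simp [z]
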